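-- pv_equiv track=rewrite | github.com/haixiangyan/leetcode-python | Databricks Karat/doc13. Domain Click.py | count_click
-- ===== SOURCE A (Python) =====
-- def count_click(array):
--     results = {}
--
--     for item in array:
--         domain, counts = item
--         sub_domains = domain.split('.')
--
--         sub_domain = ''
--         for i in range(len(sub_domains) - 1, -1, -1):
--             if sub_domain == '':
--                 sub_domain = sub_domains[i]
--             else:
--                 sub_domain = sub_domains[i] + '.' + sub_domain
--
--             if sub_domain not in results:
--                 results[sub_domain] = 0
--             results[sub_domain] += int(counts)
--     return results
-- ===== SOURCE B (Python) =====
-- def count_click(array):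
--     results = {}
--     for domain, counts in array:
--         n = int(counts)
--         # every suffix that starts right after a dot, shortest first, then the whole domain
--         keys = [domain[j + 1:] for j in range(len(domain) - 1, -1, -1) if domain[j] == '.']
--         keys.append(domain)
--         for key in keys:
--             results[key] = results.get(key, 0) + n
--     return results
-- ===== Notes on version B (the rewrite author's own statement) =====
-- stated objective: simpler
-- what changed: B drops the split and the running sub_domain accumulator with its first-iteration if/else: each suffix key is read off directly as the slice after each dot (scanned right-to-left) plus the whole domain, and the two-step absent-then-increment dict update becomes a single results.get(key,0)+n write.
-- intended difference: On arrays containing a domain that ends with '.', A's empty-string accumulator check silently collapses the empty trailing part (e.g. for [('.','1')] A returns {'': 2}), while B counts the true suffixes after each dot (B returns {'': 1, '.': 1}), which is the intended per-suffix aggregation. — e.g. on count_click([(".", "1")]): A returns [("", 2)], B returns [("", 1), (".", 1)]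
import Mathlib
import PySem

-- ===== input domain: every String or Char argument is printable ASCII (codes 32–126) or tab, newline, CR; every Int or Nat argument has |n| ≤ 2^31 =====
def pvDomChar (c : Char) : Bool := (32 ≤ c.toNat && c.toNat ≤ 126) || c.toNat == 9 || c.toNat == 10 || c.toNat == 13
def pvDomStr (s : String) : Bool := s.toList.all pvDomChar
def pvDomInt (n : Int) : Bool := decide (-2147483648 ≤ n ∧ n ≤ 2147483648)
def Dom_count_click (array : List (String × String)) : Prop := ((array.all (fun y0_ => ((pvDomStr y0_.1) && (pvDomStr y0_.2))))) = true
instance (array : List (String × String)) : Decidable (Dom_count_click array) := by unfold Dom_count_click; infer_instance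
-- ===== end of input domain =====

-- B reads each suffix key off directly (the slice after each dot, scanned right-to-left, then the
-- whole domain) instead of A's split + running sub_domain accumulator; objective: simpler.
-- Strings are handled as their character lists (String.toList / String.ofList), exact on the domain.

-- ===== PORT A =====
def count_click (array : List (String × String)) : List (String × Int) :=
  (array.foldl (fun (results : PySem.Dict String Int) item =>
    let domain := item.1
    let counts := item.2
    let sub_domains := PySem.Chars.splitOn domain.toList ['.']   -- domain.split('.')
    ((PySem.List.pyRange ((sub_domains.length : Int) - 1) (-1) (-1)).foldl
      (fun (st : List Char × PySem.Dict String Int) i =>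
        let sub_domain : List Char :=
          if st.1 = [] then PySem.List.pyGetD sub_domains i []      -- i always in range
          else PySem.List.pyGetD sub_domains i [] ++ '.' :: st.1
        let r := if st.2.contains (String.ofList sub_domain) then st.2
                 else st.2.insert (String.ofList sub_domain) 0
        (sub_domain,
         r.modify (String.ofList sub_domain) 0 (· + (PySem.Int.ofStr? counts).getD 0)))
                                                   -- int(counts); Pre_ guarantees it parses
      (([] : List Char), results)).2)
    PySem.Dict.empty).items

-- ===== PORT B =====
def count_click_alt (array : List (String × String)) : List (String × Int) :=
  (array.foldl (fun (results : PySem.Dict String Int) item =>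
    let domain := item.1
    let n := (PySem.Int.ofStr? item.2).getD 0     -- int(counts); Pre_ guarantees it parses
    let keys := (PySem.List.pyRange ((domain.toList.length : Int) - 1) (-1) (-1)).filterMap
      (fun j => if PySem.List.pyGetD domain.toList j ' ' = '.'     -- j always in range
                then some (String.ofList (PySem.List.slice domain.toList (some (j + 1)) none))
                else none)
    let keys := keys ++ [domain]
    keys.foldl (fun r key => r.insert key (r.getD key 0 + n)) results)
    PySem.Dict.empty).items

-- ===== PRECONDITION & SPEC =====
-- Pre_ excludes exactly the inputs where Python A raises ValueError: some counts string that
-- int() cannot parse (each item's counts is parsed at least once since split() is never empty).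
def Pre_count_click (array : List (String × String)) : Prop :=
  ∀ p ∈ array, (PySem.Int.ofStr? p.2).isSome = true
instance (array : List (String × String)) : Decidable (Pre_count_click array) := by
  unfold Pre_count_click; infer_instance
def pvWitness_count_click : (List (String × String)) := [("a.b.c", "3"), ("b.c", "-1")]

-- On arrays containing a domain that ends with '.', A's empty-accumulator check silently collapses
-- the empty trailing part (A returns e.g. {'': 2} for [('.','1')]), while B counts the true suffix
-- after each dot (B returns {'': 1, '.': 1}), the intended per-suffix aggregation.
def D_count_click (array : List (String × String)) : Prop :=
  (array.any (fun p => PySem.Str.endswith p.1 ".")) = true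
instance (array : List (String × String)) : Decidable (D_count_click array) := by
  unfold D_count_click; infer_instance

def Spec_count_click (array : List (String × String)) (out : List (String × Int)) : Prop :=
  ¬ D_count_click array → out = count_click_alt array
instance (array : List (String × String)) (out : List (String × Int)) : Decidable (Spec_count_click array out) := by
  unfold Spec_count_click; infer_instance

def pvDiffWitness_count_click : (List (String × String)) := [(".", "1")]
def pvDiffWitnessOut_count_click : (List (String × Int)) × (List (String × Int)) :=
  ([("", 2)], [("", 1), (".", 1)])

-- ===== CLAIM (what is proved, stated in full; the proofs are below) =====
def Claim_unchanged_count_click : Prop := ∀ (array : List (String × String)), Dom_count_click array → Pre_count_click array → Spec_count_click array (count_click array)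
def Claim_changed_count_click : Prop := Dom_count_click (pvDiffWitness_count_click) ∧ Pre_count_click (pvDiffWitness_count_click) ∧ D_count_click (pvDiffWitness_count_click) ∧ count_click (pvDiffWitness_count_click) = pvDiffWitnessOut_count_click.1 ∧ count_click_alt (pvDiffWitness_count_click) = pvDiffWitnessOut_count_click.2 ∧ pvDiffWitnessOut_count_click.1 ≠ pvDiffWitnessOut_count_click.2

def Claim_exact_count_click : Prop := ∀ (array : List (String × String)), Dom_count_click array → Pre_count_click array → D_count_click array → count_click array ≠ count_click_alt array

-- ===== LEMMAS AND PROOFS =====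

def pvSplit : List Char → List (List Char)
  | [] => [[]]
  | c :: rest =>
    if c = '.' then [] :: pvSplit rest
    else match pvSplit rest with
         | [] => [[c]]
         | h :: t => (c :: h) :: t
def pvNext (sd p : List Char) : List Char := if sd = [] then p else p ++ '.' :: sd
def pvSdAfter (sd : List Char) (ps : List (List Char)) : List Char := ps.foldl pvNext sd
def pvKeysA (sd : List Char) : List (List Char) → List (List Char)
  | [] => []
  | p :: ps => pvNext sd p :: pvKeysA (pvNext sd p) ps
def pvDotSufR : List Char → List (List Char)
  | [] => []
  | c :: rest => pvDotSufR rest ++ (if c = '.' then [rest] else [])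

theorem pvSplit_ne_nil (s : List Char) : pvSplit s ≠ [] := by
  match s with
  | [] => simp [pvSplit]
  | c :: rest =>
    unfold pvSplit
    split_ifs with h
    · simp
    · cases hr : pvSplit rest <;> simp

theorem pv_go (fuel : Nat) (l cur : List Char) (acc : List (List Char)) (h : l.length < fuel) :
    PySem.Chars.splitOn.go ['.'] fuel l cur acc
      = acc.reverse ++ (match pvSplit l with
                        | [] => []
                        | hd :: t => (cur.reverse ++ hd) :: t) := by
  induction fuel generalizing l cur acc with
  | zero => omega
  | succ f ih =>
    cases l with
    | nil => simp [PySem.Chars.splitOn.go, pvSplit]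
    | cons c rest =>
      rw [PySem.Chars.splitOn.go]
      by_cases hc : c = '.'
      · subst hc
        have hpre : List.isPrefixOf ['.'] ('.' :: rest) = true := by
          simp [List.isPrefixOf]
        rw [if_pos hpre]
        simp only [List.length_cons] at h
        rw [show List.drop (['.'].length) ('.' :: rest) = rest from rfl]
        rw [ih rest [] ((cur.reverse) :: acc) (by omega)]
        cases hs : pvSplit rest with
        | nil => exact absurd hs (pvSplit_ne_nil rest)
        | cons hd t => simp [pvSplit, hs]
      · have hpre : List.isPrefixOf ['.'] (c :: rest) = false := by
          simp [List.isPrefixOf]; exact fun hh => absurd hh.symm hc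
        rw [if_neg (by simp [hpre])]
        simp only [List.length_cons] at h
        rw [ih rest (c :: cur) acc (by omega)]
        cases hs : pvSplit rest with
        | nil => exact absurd hs (pvSplit_ne_nil rest)
        | cons hd t => simp [pvSplit, hs, if_neg hc]

theorem pv_splitOn_eq (s : List Char) : PySem.Chars.splitOn s ['.'] = pvSplit s := by
  rw [PySem.Chars.splitOn, pv_go (s.length + 1) s [] [] (by omega)]
  cases hs : pvSplit s with
  | nil => exact absurd hs (pvSplit_ne_nil s)
  | cons hd t => simp

theorem pvKeysA_append (l1 l2 : List (List Char)) (sd : List Char) :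
    pvKeysA sd (l1 ++ l2) = pvKeysA sd l1 ++ pvKeysA (pvSdAfter sd l1) l2 := by
  induction l1 generalizing sd with
  | nil => simp [pvKeysA, pvSdAfter]
  | cons p ps ih => simp [pvKeysA, pvSdAfter, ih, List.foldl_cons]

theorem pvSdAfter_append (l : List (List Char)) (p sd : List Char) :
    pvSdAfter sd (l ++ [p]) = pvNext (pvSdAfter sd l) p := by
  simp [pvSdAfter, List.foldl_append]

theorem pvA_main (s : List Char) (h : s.getLast? ≠ some '.') :
    pvSdAfter [] (pvSplit s).reverse = s ∧
    pvKeysA [] (pvSplit s).reverse = pvDotSufR s ++ [s] := by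
  induction s with
  | nil => simp [pvSplit, pvSdAfter, pvKeysA, pvNext, pvDotSufR]
  | cons c rest ih =>
    have hrest : rest.getLast? ≠ some '.' := by
      cases rest with
      | nil => simp
      | cons d ds => simpa using h
    obtain ⟨ihS, ihK⟩ := ih hrest
    by_cases hc : c = '.'
    · subst hc
      have hrne : rest ≠ [] := by
        intro hr; subst hr; simp at h
      rw [show pvSplit ('.' :: rest) = [] :: pvSplit rest from by rw [pvSplit]; simp]
      rw [List.reverse_cons]
      have hnext : pvNext rest [] = '.' :: rest := by simp [pvNext, hrne]
      refine ⟨?_, ?_⟩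
      · rw [pvSdAfter_append, ihS, hnext]
      · rw [pvKeysA_append, ihK, ihS]
        simp [pvKeysA, hnext, pvDotSufR]
    · obtain ⟨h1, t, hsplit⟩ : ∃ h1 t, pvSplit rest = h1 :: t := by
        cases hs : pvSplit rest with
        | nil => exact absurd hs (pvSplit_ne_nil rest)
        | cons a b => exact ⟨a, b, rfl⟩
      have hspl : pvSplit (c :: rest) = (c :: h1) :: t := by
        rw [pvSplit, if_neg hc, hsplit]
      rw [hspl, List.reverse_cons]
      rw [hsplit, List.reverse_cons] at ihS ihK
      rw [pvSdAfter_append] at ihS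
      rw [pvKeysA_append] at ihK
      simp only [pvKeysA] at ihK
      have hpre : pvKeysA [] t.reverse = pvDotSufR rest := by
        exact (by simpa using ihK :
          pvKeysA [] t.reverse = pvDotSufR rest ∧ pvNext (pvSdAfter [] t.reverse) h1 = rest).1
      have hnext : pvNext (pvSdAfter [] t.reverse) (c :: h1) = c :: rest := by
        by_cases hx : pvSdAfter [] t.reverse = []
        · rw [pvNext, if_pos hx]
          rw [pvNext, if_pos hx] at ihS
          rw [ihS]
        · rw [pvNext, if_neg hx]
          rw [pvNext, if_neg hx] at ihS
          rw [List.cons_append, ihS]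
      refine ⟨?_, ?_⟩
      · rw [pvSdAfter_append, hnext]
      · rw [pvKeysA_append, hpre]
        simp [pvKeysA, hnext, pvDotSufR, hc]

theorem pvB_main (cs : List Char) :
    (List.range cs.length).filterMap
      (fun k => if cs.getD k ' ' = '.'
                then some (String.ofList (cs.drop (k + 1))) else none)
      = ((pvDotSufR cs).reverse.map String.ofList) := by
  induction cs with
  | nil => simp [pvDotSufR]
  | cons c rest ih =>
    rw [List.length_cons, List.range_succ_eq_map, List.filterMap_cons, List.filterMap_map]
    have hcomp : ((fun k => if (c :: rest).getD k ' ' = '.'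
                then some (String.ofList ((c :: rest).drop (k + 1))) else none) ∘ Nat.succ)
        = (fun k => if rest.getD k ' ' = '.'
                then some (String.ofList (rest.drop (k + 1))) else none) := by
      funext k
      simp [Function.comp]
    rw [hcomp, ih]
    by_cases hc : c = '.'
    · simp [hc, pvDotSufR]
    · simp [hc, pvDotSufR]

theorem pvBump (r : PySem.Dict String Int) (k : String) (n : Int) :
    ((if r.contains k then r else r.insert k 0).modify k 0 (· + n))
      = r.insert k (r.getD k 0 + n) := by
  by_cases h : r.contains k = true
  · rw [if_pos h]
    rfl
  · rw [if_neg h]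
    have hfind : ∀ p ∈ r.items, ¬ (p.1 == k) = true := by
      intro p hp hpk
      exact h (List.any_eq_true.mpr ⟨p, hp, hpk⟩)
    have hnone : List.find? (fun p => p.1 == k) r.items = none :=
      List.find?_eq_none.mpr hfind
    have hins : r.insert k 0 = PySem.Dict.mk (r.items ++ [(k, 0)]) := by
      rw [PySem.Dict.insert, if_neg h]
    have hgetD : r.getD k 0 = 0 := by
      rw [PySem.Dict.getD, PySem.Dict.get?, hnone]; rfl
    rw [hins, PySem.Dict.modify, hgetD]
    -- getD of appended dict at k is 0
    have hget2 : (PySem.Dict.mk (r.items ++ [(k, 0)])).getD k 0 = 0 := by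
      rw [PySem.Dict.getD, PySem.Dict.get?]
      rw [show (PySem.Dict.mk (r.items ++ [(k, 0)])).items = r.items ++ [(k, 0)] from rfl]
      rw [List.find?_append, hnone]
      simp
    rw [hget2]
    have hcont2 : (PySem.Dict.mk (r.items ++ [(k, 0)])).contains k = true := by
      simp [PySem.Dict.contains]
    rw [PySem.Dict.insert, if_pos hcont2, PySem.Dict.insert, if_neg h]
    simp only [PySem.Dict.mk.injEq]
    rw [List.map_append]
    congr 1
    · calc List.map (fun p => if (p.1 == k) = true then (k, 0 + n) else p) r.items
          = List.map id r.items := List.map_congr_left (fun p hp => by rw [if_neg (by exact hfind p hp)]; rfl)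
        _ = r.items := List.map_id r.items
    · simp

theorem pv_fold_rev_idx {α β : Type} (xs : List α) (d : α) (f : β → α → β) (init : β) :
    (PySem.List.pyRange ((xs.length : Int) - 1) (-1) (-1)).foldl
      (fun acc i => f acc (PySem.List.pyGetD xs i d)) init
      = xs.reverse.foldl f init := by
  rw [PySem.List.pyRange_neg_one_eq_reverse]
  rw [show ((-1 : Int) + 1) = 0 from rfl, show ((xs.length : Int) - 1 + 1) = (xs.length : Int) from by ring]
  rw [← List.foldl_map (f := fun j => PySem.List.pyGetD xs j d) (g := f)]
  rw [List.map_reverse, PySem.List.map_pyGetD_pyRange_zero']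

theorem pv_filterMap_rev_idx {β : Type} (cs : List Char) (F : Int → Option β) :
    (PySem.List.pyRange ((cs.length : Int) - 1) (-1) (-1)).filterMap F
      = (List.filterMap (fun (k : Nat) => F (k : Int)) (List.range cs.length)).reverse := by
  rw [PySem.List.pyRange_neg_one_eq_reverse]
  rw [show ((-1 : Int) + 1) = 0 from rfl, show ((cs.length : Int) - 1 + 1) = (cs.length : Int) from by ring]
  rw [List.filterMap_reverse]
  rw [PySem.List.pyRange_one, List.filterMap_map]
  rw [show ((cs.length : Int) - 0).toNat = cs.length from by simp]
  have hcmp : (F ∘ fun (k : Nat) => (0 : Int) + ↑k) = fun (k : Nat) => F (k : Int) := by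
    funext k; simp [Function.comp]
  rw [hcmp]

theorem pv_keysB (cs : List Char) :
    (PySem.List.pyRange ((cs.length : Int) - 1) (-1) (-1)).filterMap
      (fun j => if PySem.List.pyGetD cs j ' ' = '.'
                then some (String.ofList (PySem.List.slice cs (some (j + 1)) none))
                else none)
      = (pvDotSufR cs).map String.ofList := by
  rw [pv_filterMap_rev_idx]
  have hfun : (fun (k : Nat) => if PySem.List.pyGetD cs (k : Int) ' ' = '.'
                then some (String.ofList (PySem.List.slice cs (some ((k : Int) + 1)) none))
                else none)
      = (fun k => if cs.getD k ' ' = '.'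
                then some (String.ofList (cs.drop (k + 1))) else none) := by
    funext k
    rw [PySem.List.pyGetD_natCast]
    rw [show ((k : Int) + 1) = ((k + 1 : Nat) : Int) from by push_cast; ring]
    rw [PySem.List.slice_from cs (by positivity), Int.toNat_natCast]
  rw [hfun, pvB_main]
  simp

def pvBumpK (n : Int) (r : PySem.Dict String Int) (k : List Char) : PySem.Dict String Int :=
  r.insert (String.ofList k) (r.getD (String.ofList k) 0 + n)

theorem pv_pairfold (ps : List (List Char)) (sd : List Char) (r : PySem.Dict String Int) (n : Int) :
    ps.foldl (fun (st : List Char × PySem.Dict String Int) p =>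
        (if st.1 = [] then p else p ++ '.' :: st.1,
         (if st.2.contains (String.ofList (if st.1 = [] then p else p ++ '.' :: st.1)) then st.2
          else st.2.insert (String.ofList (if st.1 = [] then p else p ++ '.' :: st.1)) 0).modify
           (String.ofList (if st.1 = [] then p else p ++ '.' :: st.1)) 0 (· + n)))
      (sd, r)
    = (pvSdAfter sd ps, (pvKeysA sd ps).foldl (pvBumpK n) r) := by
  induction ps generalizing sd r with
  | nil => simp [pvSdAfter, pvKeysA]
  | cons p ps ih =>
    rw [List.foldl_cons, ih]
    refine Prod.ext ?_ ?_
    · rfl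
    · show (pvKeysA (pvNext sd p) ps).foldl (pvBumpK n)
          ((if r.contains (String.ofList (pvNext sd p)) then r
            else r.insert (String.ofList (pvNext sd p)) 0).modify (String.ofList (pvNext sd p)) 0 (· + n))
        = ((pvKeysA sd (p :: ps)).foldl (pvBumpK n) r)
      rw [pvBump]
      rfl

theorem pv_item (acc : PySem.Dict String Int) (x : String × String)
    (h : x.1.toList.getLast? ≠ some '.') :
    ((PySem.List.pyRange (((PySem.Chars.splitOn x.1.toList ['.']).length : Int) - 1) (-1) (-1)).foldl
      (fun (st : List Char × PySem.Dict String Int) i =>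
        (if st.1 = [] then PySem.List.pyGetD (PySem.Chars.splitOn x.1.toList ['.']) i []
         else PySem.List.pyGetD (PySem.Chars.splitOn x.1.toList ['.']) i [] ++ '.' :: st.1,
         (if st.2.contains (String.ofList (if st.1 = [] then PySem.List.pyGetD (PySem.Chars.splitOn x.1.toList ['.']) i []
              else PySem.List.pyGetD (PySem.Chars.splitOn x.1.toList ['.']) i [] ++ '.' :: st.1)) then st.2
          else st.2.insert (String.ofList (if st.1 = [] then PySem.List.pyGetD (PySem.Chars.splitOn x.1.toList ['.']) i []
              else PySem.List.pyGetD (PySem.Chars.splitOn x.1.toList ['.']) i [] ++ '.' :: st.1)) 0).modify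
           (String.ofList (if st.1 = [] then PySem.List.pyGetD (PySem.Chars.splitOn x.1.toList ['.']) i []
              else PySem.List.pyGetD (PySem.Chars.splitOn x.1.toList ['.']) i [] ++ '.' :: st.1)) 0
           (· + (PySem.Int.ofStr? x.2).getD 0)))
      (([] : List Char), acc)).2
    = ((PySem.List.pyRange ((x.1.toList.length : Int) - 1) (-1) (-1)).filterMap
        (fun j => if PySem.List.pyGetD x.1.toList j ' ' = '.'
                  then some (String.ofList (PySem.List.slice x.1.toList (some (j + 1)) none))
                  else none) ++ [x.1]).foldl
        (fun r key => r.insert key (r.getD key 0 + (PySem.Int.ofStr? x.2).getD 0)) acc := by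
  rw [pv_fold_rev_idx (PySem.Chars.splitOn x.1.toList ['.']) []
      (fun (st : List Char × PySem.Dict String Int) p =>
        (if st.1 = [] then p else p ++ '.' :: st.1,
         (if st.2.contains (String.ofList (if st.1 = [] then p else p ++ '.' :: st.1)) then st.2
          else st.2.insert (String.ofList (if st.1 = [] then p else p ++ '.' :: st.1)) 0).modify
           (String.ofList (if st.1 = [] then p else p ++ '.' :: st.1)) 0
           (· + (PySem.Int.ofStr? x.2).getD 0)))
      (([] : List Char), acc)]
  rw [pv_splitOn_eq, pv_pairfold]
  rw [(pvA_main x.1.toList h).2]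
  rw [pv_keysB]
  -- now: ((pvDotSufR cs ++ [cs]).foldl (pvBumpK n) acc) = ((pvDotSufR cs).map ofList ++ [x.1]).foldl bumpStr acc
  rw [List.foldl_append, List.foldl_append]
  rw [List.foldl_map]
  unfold pvBumpK
  simp [String.ofList_toList]

theorem pv_last_ne (s : String) (h : PySem.Str.endswith s "." = false) :
    s.toList.getLast? ≠ some '.' := by
  intro hl
  obtain ⟨ys, hys⟩ := List.getLast?_eq_some_iff.mp hl
  have : PySem.Chars.endswith s.toList ['.'] = true :=
    (PySem.Chars.endswith_iff _ _).mpr ⟨ys, hys.symm⟩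
  have hb : PySem.Str.endswith s "." = PySem.Chars.endswith s.toList ['.'] := by
    simp [PySem.Str.endswith]
  rw [hb, this] at h
  simp at h

theorem pv_main (array : List (String × String)) (hD : ¬ (array.any (fun p => PySem.Str.endswith p.1 ".")) = true) :
    count_click array = count_click_alt array := by
  have hitems : ∀ p ∈ array, p.1.toList.getLast? ≠ some '.' := by
    intro p hp
    refine pv_last_ne p.1 ?_
    by_contra hne
    exact hD (List.any_eq_true.mpr ⟨p, hp, by revert hne; cases PySem.Str.endswith p.1 "." <;> simp⟩)
  unfold count_click count_click_alt
  congr 1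
  exact PySem.List.foldl_congr_mem array _ _ _ (fun acc x hx => pv_item acc x (hitems x hx))

-- ===== tightness =====
theorem pvSplit_no_dot (s : List Char) : ∀ p ∈ pvSplit s, '.' ∉ p := by
  induction s with
  | nil => intro p hp; simp [pvSplit] at hp; subst hp; simp
  | cons c rest ih =>
    intro p hp
    by_cases hc : c = '.'
    · subst hc
      rw [show pvSplit ('.' :: rest) = [] :: pvSplit rest from by rw [pvSplit]; simp] at hp
      rcases List.mem_cons.mp hp with h | h
      · subst h; simp
      · exact ih p h
    · obtain ⟨h1, t, hsplit⟩ : ∃ h1 t, pvSplit rest = h1 :: t := by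
        cases hs : pvSplit rest with
        | nil => exact absurd hs (pvSplit_ne_nil rest)
        | cons a b => exact ⟨a, b, rfl⟩
      rw [show pvSplit (c :: rest) = (c :: h1) :: t from by rw [pvSplit, if_neg hc, hsplit]] at hp
      rcases List.mem_cons.mp hp with h | h
      · subst h
        intro hmem
        rcases List.mem_cons.mp hmem with h' | h'
        · exact hc h'.symm
        · exact ih h1 (by rw [hsplit]; exact List.mem_cons_self) h'
      · exact ih p (by rw [hsplit]; exact List.mem_cons.mpr (Or.inr h))

def pvCharP (l : List Char) : Prop := l.getLast? ≠ some '.'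

theorem pvNext_charP (sd p : List Char) (hsd : sd = [] ∨ pvCharP sd) (hp : '.' ∉ p) :
    pvCharP (pvNext sd p) := by
  rcases hsd with h | h
  · subst h
    rw [pvNext, if_pos rfl]
    intro hl
    obtain ⟨ys, hys⟩ := List.getLast?_eq_some_iff.mp hl
    exact hp (by rw [hys]; simp)
  · by_cases hx : sd = []
    · subst hx
      rw [pvNext, if_pos rfl]
      intro hl
      obtain ⟨ys, hys⟩ := List.getLast?_eq_some_iff.mp hl
      exact hp (by rw [hys]; simp)
    · rw [pvNext, if_neg hx]
      obtain ⟨d, ds, rfl⟩ : ∃ d ds, sd = d :: ds := by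
        cases sd with
        | nil => exact absurd rfl hx
        | cons d ds => exact ⟨d, ds, rfl⟩
      intro hl
      rw [List.getLast?_append_of_ne_nil _ (by simp), List.getLast?_cons_cons] at hl
      exact h hl

theorem pvKeysA_charP (ps : List (List Char)) (sd : List Char)
    (hsd : sd = [] ∨ pvCharP sd) (hps : ∀ p ∈ ps, '.' ∉ p) :
    ∀ k ∈ pvKeysA sd ps, pvCharP k := by
  induction ps generalizing sd with
  | nil => intro k hk; simp [pvKeysA] at hk
  | cons p ps ih =>
    intro k hk
    rw [pvKeysA] at hk
    rcases List.mem_cons.mp hk with h | h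
    · subst h; exact pvNext_charP sd p hsd (hps p List.mem_cons_self)
    · exact ih (pvNext sd p) (Or.inr (pvNext_charP sd p hsd (hps p List.mem_cons_self)))
        (fun q hq => hps q (List.mem_cons.mpr (Or.inr hq))) k h

theorem pv_foldl_bumpK_keys (ls : List (List Char)) (r : PySem.Dict String Int) (n : Int)
    (k : String) (hk : k ∈ (ls.foldl (pvBumpK n) r).keys) :
    (∃ l ∈ ls, k = String.ofList l) ∨ k ∈ r.keys := by
  induction ls generalizing r with
  | nil => exact Or.inr hk
  | cons l ls ih =>
    rw [List.foldl_cons] at hk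
    rcases ih (pvBumpK n r l) hk with h | h
    · rcases h with ⟨l', hl', hk'⟩
      exact Or.inl ⟨l', List.mem_cons.mpr (Or.inr hl'), hk'⟩
    · rcases (PySem.Dict.mem_keys_insert r (String.ofList l) k _).mp h with h' | h'
      · exact Or.inl ⟨l, List.mem_cons_self, h'⟩
      · exact Or.inr h'

-- all keys of A's result dict avoid a trailing dot
theorem pvA_keys_charP (array : List (String × String)) (r : PySem.Dict String Int)
    (hr : ∀ k ∈ r.keys, pvCharP k.toList) :
    ∀ k ∈ (array.foldl (fun (results : PySem.Dict String Int) item =>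
      ((PySem.List.pyRange (((PySem.Chars.splitOn item.1.toList ['.']).length : Int) - 1) (-1) (-1)).foldl
        (fun (st : List Char × PySem.Dict String Int) i =>
          (if st.1 = [] then PySem.List.pyGetD (PySem.Chars.splitOn item.1.toList ['.']) i []
           else PySem.List.pyGetD (PySem.Chars.splitOn item.1.toList ['.']) i [] ++ '.' :: st.1,
           (if st.2.contains (String.ofList (if st.1 = [] then PySem.List.pyGetD (PySem.Chars.splitOn item.1.toList ['.']) i []
                else PySem.List.pyGetD (PySem.Chars.splitOn item.1.toList ['.']) i [] ++ '.' :: st.1)) then st.2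
            else st.2.insert (String.ofList (if st.1 = [] then PySem.List.pyGetD (PySem.Chars.splitOn item.1.toList ['.']) i []
                else PySem.List.pyGetD (PySem.Chars.splitOn item.1.toList ['.']) i [] ++ '.' :: st.1)) 0).modify
             (String.ofList (if st.1 = [] then PySem.List.pyGetD (PySem.Chars.splitOn item.1.toList ['.']) i []
                else PySem.List.pyGetD (PySem.Chars.splitOn item.1.toList ['.']) i [] ++ '.' :: st.1)) 0
             (· + (PySem.Int.ofStr? item.2).getD 0)))
        (([] : List Char), results)).2) r).keys, pvCharP k.toList := by
  induction array generalizing r with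
  | nil => exact hr
  | cons x xs ih =>
    rw [List.foldl_cons]
    refine ih _ ?_
    intro k hk
    rw [pv_fold_rev_idx (PySem.Chars.splitOn x.1.toList ['.']) []
        (fun (st : List Char × PySem.Dict String Int) p =>
          (if st.1 = [] then p else p ++ '.' :: st.1,
           (if st.2.contains (String.ofList (if st.1 = [] then p else p ++ '.' :: st.1)) then st.2
            else st.2.insert (String.ofList (if st.1 = [] then p else p ++ '.' :: st.1)) 0).modify
             (String.ofList (if st.1 = [] then p else p ++ '.' :: st.1)) 0
             (· + (PySem.Int.ofStr? x.2).getD 0)))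
        (([] : List Char), r), pv_splitOn_eq, pv_pairfold] at hk
    rcases pv_foldl_bumpK_keys _ _ _ k hk with h | h
    · rcases h with ⟨l, hl, rfl⟩
      rw [String.toList_ofList]
      exact pvKeysA_charP _ [] (Or.inl rfl)
        (fun p hp => pvSplit_no_dot x.1.toList p (by
          have := List.mem_reverse.mp hp; exact this)) l hl
    · exact hr k h

theorem pv_insfold_mono (ls : List String) (f : PySem.Dict String Int → String → Int)
    (r : PySem.Dict String Int) (k : String) (hk : k ∈ r.keys) :
    k ∈ (ls.foldl (fun r key => r.insert key (f r key)) r).keys := by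
  induction ls generalizing r with
  | nil => exact hk
  | cons l ls ih =>
    rw [List.foldl_cons]
    exact ih _ ((PySem.Dict.mem_keys_insert r l k _).mpr (Or.inr hk))

theorem pv_insfold_self (ls : List String) (x : String) (f : PySem.Dict String Int → String → Int)
    (r : PySem.Dict String Int) :
    x ∈ ((ls ++ [x]).foldl (fun r key => r.insert key (f r key)) r).keys := by
  rw [List.foldl_append, List.foldl_cons, List.foldl_nil]
  exact (PySem.Dict.mem_keys_insert _ x x _).mpr (Or.inl rfl)

theorem pvB_keys_mono (xs : List (String × String)) (r : PySem.Dict String Int) (k : String)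
    (hk : k ∈ r.keys) :
    k ∈ (xs.foldl (fun (results : PySem.Dict String Int) item =>
      ((PySem.List.pyRange ((item.1.toList.length : Int) - 1) (-1) (-1)).filterMap
          (fun j => if PySem.List.pyGetD item.1.toList j ' ' = '.'
                    then some (String.ofList (PySem.List.slice item.1.toList (some (j + 1)) none))
                    else none) ++ [item.1]).foldl
        (fun r key => r.insert key (r.getD key 0 + (PySem.Int.ofStr? item.2).getD 0)) results) r).keys := by
  induction xs generalizing r with
  | nil => exact hk
  | cons x xs ih =>
    rw [List.foldl_cons]
    exact ih _ (pv_insfold_mono _ (fun r key => r.getD key 0 + (PySem.Int.ofStr? x.2).getD 0) r k hk)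

theorem pv_tight (array : List (String × String)) (hD : (array.any (fun p => PySem.Str.endswith p.1 ".")) = true) :
    count_click array ≠ count_click_alt array := by
  intro heq
  obtain ⟨x, hx, hxe⟩ := List.any_eq_true.mp hD
  have hlast : x.1.toList.getLast? = some '.' := by
    have he : PySem.Chars.endswith x.1.toList ['.'] = true := by
      simpa [PySem.Str.endswith] using hxe
    obtain ⟨t, ht⟩ := (PySem.Chars.endswith_iff _ _).mp he
    rw [← ht, List.getLast?_concat]
  have hmemB : x.1 ∈ ((array.foldl (fun (results : PySem.Dict String Int) item =>
      ((PySem.List.pyRange ((item.1.toList.length : Int) - 1) (-1) (-1)).filterMap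
          (fun j => if PySem.List.pyGetD item.1.toList j ' ' = '.'
                    then some (String.ofList (PySem.List.slice item.1.toList (some (j + 1)) none))
                    else none) ++ [item.1]).foldl
        (fun r key => r.insert key (r.getD key 0 + (PySem.Int.ofStr? item.2).getD 0)) results)
      PySem.Dict.empty)).keys := by
    obtain ⟨pre, suf, rfl⟩ := List.append_of_mem hx
    rw [List.foldl_append, List.foldl_cons]
    exact pvB_keys_mono suf _ x.1
      (pv_insfold_self _ x.1 (fun r key => r.getD key 0 + (PySem.Int.ofStr? x.2).getD 0) _)
  have hmemA : x.1 ∈ ((array.foldl (fun (results : PySem.Dict String Int) item =>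
      ((PySem.List.pyRange (((PySem.Chars.splitOn item.1.toList ['.']).length : Int) - 1) (-1) (-1)).foldl
        (fun (st : List Char × PySem.Dict String Int) i =>
          (if st.1 = [] then PySem.List.pyGetD (PySem.Chars.splitOn item.1.toList ['.']) i []
           else PySem.List.pyGetD (PySem.Chars.splitOn item.1.toList ['.']) i [] ++ '.' :: st.1,
           (if st.2.contains (String.ofList (if st.1 = [] then PySem.List.pyGetD (PySem.Chars.splitOn item.1.toList ['.']) i []
                else PySem.List.pyGetD (PySem.Chars.splitOn item.1.toList ['.']) i [] ++ '.' :: st.1)) then st.2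
            else st.2.insert (String.ofList (if st.1 = [] then PySem.List.pyGetD (PySem.Chars.splitOn item.1.toList ['.']) i []
                else PySem.List.pyGetD (PySem.Chars.splitOn item.1.toList ['.']) i [] ++ '.' :: st.1)) 0).modify
             (String.ofList (if st.1 = [] then PySem.List.pyGetD (PySem.Chars.splitOn item.1.toList ['.']) i []
                else PySem.List.pyGetD (PySem.Chars.splitOn item.1.toList ['.']) i [] ++ '.' :: st.1)) 0
             (· + (PySem.Int.ofStr? item.2).getD 0)))
        (([] : List Char), results)).2)
      PySem.Dict.empty)).keys := by
    rw [PySem.Dict.keys]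
    rw [show ((array.foldl _ PySem.Dict.empty)).items = _ from heq]
    exact hmemB
  exact pvA_keys_charP array PySem.Dict.empty (by simp [PySem.Dict.empty, PySem.Dict.keys]) x.1 hmemA hlast

-- ===== VERDICT (by name: the statement is the Claim_ definition above) =====
theorem count_click_spec : Claim_unchanged_count_click := by
  intro array _hdom _hpre hD
  exact pv_main array hD

theorem count_click_changed : Claim_changed_count_click := by
  unfold Claim_changed_count_click; decide

theorem count_click_tight : Claim_exact_count_click := by
  intro array _hdom _hpre hD
  exact pv_tight array hD
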